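-- pv_equiv track=rewrite | github.com/maestro-suite/maestro-suite.github.io | scripts/export_model_boxplot_dataset.py | _union_headers
-- ===== SOURCE A (Python) =====
-- from typing import List, Dict, Any
--
-- def _union_headers(rows: List[Dict[str, Any]]) -> List[str]:
--     header_set = set()
--     for row in rows:
--         header_set.update(row.keys())
--     # Stable key order with commonly useful columns first.
--     priority = [
--         "run_id",
--         "run_label",
--         "group_label",
--         "gen_ai_system",
--         "gen_ai_model",
--         "task_count",
--         "failed_tasks",
--         "failure_rate",
--         "total_duration_seconds",
--         "avg_duration_seconds",
--         "total_tokens",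
--         "avg_total_tokens",
--         "input_tokens",
--         "output_tokens",
--         "cost_total",
--     ]
--     ordered = [k for k in priority if k in header_set]
--     ordered.extend(sorted(header_set - set(ordered)))
--     return ordered
-- ===== SOURCE B (Python) =====
-- from typing import List, Dict, Any
--
-- def _union_headers(rows: List[Dict[str, Any]]) -> List[str]:
--     header_set = set()
--     for row in rows:
--         header_set.update(row.keys())
--     priority = [
--         "run_id",
--         "run_label",
--         "group_label",
--         "gen_ai_system",
--         "gen_ai_model",
--         "task_count",
--         "failed_tasks",
--         "failure_rate",
--         "total_duration_seconds",
--         "avg_duration_seconds",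
--         "total_tokens",
--         "avg_total_tokens",
--         "input_tokens",
--         "output_tokens",
--         "cost_total",
--     ]
--     idx = {name: i for i, name in enumerate(priority)}
--     n = len(priority)
--     # One keyed sort: priority keys get their distinct priority index,
--     # all other keys share index n and tie-break lexicographically.
--     return sorted(header_set, key=lambda k: (idx.get(k, n), k))
-- ===== Notes on version B (the rewrite author's own statement) =====
-- stated objective: simpler
-- what changed: A builds the output in two passes (a filter of the priority list against the header set, then a separate lexicographic sort of the set difference appended behind it); B builds a name-to-rank dict from the priority list once and produces the whole output with a single keyed sort of the header set, where priority names get their distinct rank and every other name shares rank len(priority) with the name itself as lexicographic tie-break.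
import Mathlib
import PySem

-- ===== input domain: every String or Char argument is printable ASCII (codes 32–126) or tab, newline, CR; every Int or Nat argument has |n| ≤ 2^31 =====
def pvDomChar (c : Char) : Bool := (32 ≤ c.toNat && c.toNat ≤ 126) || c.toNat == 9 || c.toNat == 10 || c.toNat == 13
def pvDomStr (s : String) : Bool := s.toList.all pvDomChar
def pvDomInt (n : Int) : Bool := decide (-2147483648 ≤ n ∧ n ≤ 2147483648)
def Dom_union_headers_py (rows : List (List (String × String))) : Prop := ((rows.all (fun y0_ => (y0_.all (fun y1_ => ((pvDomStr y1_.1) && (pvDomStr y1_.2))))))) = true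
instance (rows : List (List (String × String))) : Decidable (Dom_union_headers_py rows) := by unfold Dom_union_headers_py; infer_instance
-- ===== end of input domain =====

-- B replaces A's two-pass construction (priority filter + sort of the set difference)
-- with one keyed sort of the header set; equivalence is proved on all inputs.

-- the 'priority' literal both Pythons contain verbatim, hoisted as a shared constant
def pvPriority : List String :=
  ["run_id", "run_label", "group_label", "gen_ai_system", "gen_ai_model",
   "task_count", "failed_tasks", "failure_rate", "total_duration_seconds",
   "avg_duration_seconds", "total_tokens", "avg_total_tokens",
   "input_tokens", "output_tokens", "cost_total"]

-- the header_set loop, identical in both Pythons ('for row in rows: header_set.update(row.keys())')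
def pvHeaderSet (rows : List (List (String × String))) : PySem.Set String :=
  rows.foldl (fun s row => PySem.Set.update s (PySem.Dict.keys ⟨row⟩)) PySem.Set.empty

-- ===== PORT A =====
def union_headers_py (rows : List (List (String × String))) : List String :=
  let header_set := pvHeaderSet rows
  let ordered := pvPriority.filter (fun k => PySem.Set.contains header_set k)
  ordered ++ PySem.List.sorted (PySem.Set.diff header_set (PySem.Set.ofList ordered)) (fun x => x)

-- ===== PORT B =====
-- idx = {name: i for i, name in enumerate(priority)}
def pvIdx : PySem.Dict String Int :=
  (PySem.List.enumerate pvPriority).foldl (fun d p => PySem.Dict.insert d p.2 p.1) PySem.Dict.empty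

def union_headers_py_alt (rows : List (List (String × String))) : List String :=
  let header_set := pvHeaderSet rows
  let n : Int := (pvPriority.length : Int)
  PySem.List.sorted2 header_set (fun k => PySem.Dict.getD pvIdx k n) (fun k => k)

-- ===== PRECONDITION & SPEC =====
def Spec_union_headers_py (rows : List (List (String × String))) (out : List String) : Prop := out = union_headers_py_alt rows
instance (rows : List (List (String × String))) (out : List String) : Decidable (Spec_union_headers_py rows out) := by unfold Spec_union_headers_py; infer_instance

-- ===== CLAIM (what is proved, stated in full; the proofs are below) =====
def Claim_equal_union_headers_py : Prop := ∀ (rows : List (List (String × String))), Dom_union_headers_py rows → Spec_union_headers_py rows (union_headers_py rows)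

-- ===== LEMMAS AND PROOFS =====

-- B's sort key, and the strict comparison sorted2 uses with it
def pvKey (k : String) : Int := PySem.Dict.getD pvIdx k (pvPriority.length : Int)

def pvLt (a b : String) : Bool :=
  decide (pvKey a < pvKey b) || (!decide (pvKey b < pvKey a) && decide (a < b))

theorem pvLt_iff (a b : String) :
    pvLt a b = true ↔ (pvKey a < pvKey b ∨ (¬ pvKey b < pvKey a ∧ a < b)) := by
  simp [pvLt]

theorem pvLt_of_key_lt (a b : String) (h : pvKey a < pvKey b) : pvLt a b = true := by
  rw [pvLt_iff]; exact Or.inl h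

theorem pvLt_asym (a b : String) (h : pvLt a b = true) : pvLt b a = false := by
  by_contra hc
  rw [Bool.not_eq_false, pvLt_iff] at hc
  rw [pvLt_iff] at h
  rcases h with h | ⟨h1, h2⟩ <;> rcases hc with hc | ⟨hc1, hc2⟩
  · exact absurd hc (lt_asymm h)
  · exact hc1 h
  · exact h1 hc
  · exact absurd hc2 (lt_asymm h2)

theorem pvLt_trans (a b c : String) (hab : pvLt a b = true) (hbc : pvLt b c = true) :
    pvLt a c = true := by
  rw [pvLt_iff] at hab hbc ⊢
  rcases hab with h | ⟨h1, h2⟩ <;> rcases hbc with g | ⟨g1, g2⟩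
  · exact Or.inl (lt_trans h g)
  · exact Or.inl (lt_of_lt_of_le h (not_lt.mp g1))
  · exact Or.inl (lt_of_le_of_lt (not_lt.mp h1) g)
  · exact Or.inr ⟨not_lt.mpr (le_trans (not_lt.mp h1) (not_lt.mp g1)), lt_trans h2 g2⟩

theorem pvLt_tot (a b : String) (h1 : pvLt a b = false) (h2 : pvLt b a = false) : a = b := by
  rw [← Bool.not_eq_true, pvLt_iff] at h1 h2
  obtain ⟨h1a, h1b⟩ := not_or.mp h1
  obtain ⟨h2a, h2b⟩ := not_or.mp h2
  have hk : pvKey a = pvKey b := le_antisymm (not_lt.mp h2a) (not_lt.mp h1a)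
  have hna : ¬ a < b := fun hlt => h1b ⟨by rw [hk]; exact lt_irrefl _, hlt⟩
  have hnb : ¬ b < a := fun hlt => h2b ⟨by rw [hk]; exact lt_irrefl _, hlt⟩
  exact le_antisymm (not_lt.mp hnb) (not_lt.mp hna)

theorem pv_insertBy_pairwise (x : String) (ys : List String)
    (h : ys.Pairwise (fun a b => pvLt b a = false)) :
    (PySem.List.insertBy pvLt x ys).Pairwise (fun a b => pvLt b a = false) := by
  induction ys with
  | nil => simp [PySem.List.insertBy]
  | cons y ys ih =>
    rw [List.pairwise_cons] at h
    obtain ⟨hy, hys⟩ := h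
    by_cases hxy : pvLt x y = true
    · rw [show PySem.List.insertBy pvLt x (y :: ys) = x :: y :: ys from by
        simp [PySem.List.insertBy, hxy]]
      refine List.Pairwise.cons ?_ (List.Pairwise.cons hy hys)
      intro z hz
      rcases List.mem_cons.mp hz with rfl | hz
      · exact pvLt_asym _ _ hxy
      · by_contra hc
        rw [Bool.not_eq_false] at hc
        have := pvLt_trans _ _ _ hc hxy
        rw [hy z hz] at this
        exact Bool.false_ne_true this
    · have hxy' : pvLt x y = false := Bool.eq_false_iff.mpr hxy
      rw [show PySem.List.insertBy pvLt x (y :: ys) = y :: PySem.List.insertBy pvLt x ys from by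
        simp [PySem.List.insertBy, hxy]]
      refine List.Pairwise.cons ?_ (ih hys)
      intro z hz
      rcases (PySem.List.mem_insertBy pvLt x z ys).mp hz with rfl | hz
      · exact hxy'
      · exact hy z hz

theorem pv_foldl_insertBy_pairwise (xs acc : List String)
    (h : acc.Pairwise (fun a b => pvLt b a = false)) :
    (xs.foldl (fun acc x => PySem.List.insertBy pvLt x acc) acc).Pairwise
      (fun a b => pvLt b a = false) := by
  induction xs generalizing acc with
  | nil => simpa
  | cons x xs ih => exact ih _ (pv_insertBy_pairwise x acc h)

-- uniqueness: any strictly pvLt-increasing rearrangement of xs IS the insertion sort of xs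
theorem pv_sorted_unique (xs ys : List String) (hperm : ys.Perm xs)
    (hpw : ys.Pairwise (fun a b => pvLt a b = true)) :
    xs.foldl (fun acc x => PySem.List.insertBy pvLt x acc) [] = ys := by
  refine List.Perm.eq_of_pairwise (le := fun a b => pvLt b a = false)
    (fun a b _ _ hab hba => pvLt_tot a b hba hab)
    (pv_foldl_insertBy_pairwise xs [] List.Pairwise.nil)
    (hpw.imp (fun h => pvLt_asym _ _ h)) ?_
  exact (PySem.List.foldl_insertBy_perm pvLt xs []).trans (by simpa using hperm.symm)

theorem pv_pri_nodup : pvPriority.Nodup := by decide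

theorem pv_pri_pairwise : pvPriority.Pairwise (fun a b => pvKey a < pvKey b) := by decide

theorem pv_pri_key_lt : ∀ a ∈ pvPriority, pvKey a < 15 := by decide

theorem pvIdx_keys : ∀ p ∈ pvIdx.items, p.1 ∈ pvPriority := by decide

theorem pvKey_not_mem (k : String) (hk : k ∉ pvPriority) : pvKey k = 15 := by
  have hnone : List.find? (fun p => p.1 == k) pvIdx.items = none :=
    List.find?_eq_none.mpr (fun p hp hc => hk (beq_iff_eq.mp hc ▸ pvIdx_keys p hp))
  unfold pvKey PySem.Dict.getD PySem.Dict.get?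
  rw [hnone]
  rfl

theorem pv_headerSet_nodup_aux (rows : List (List (String × String))) (s : PySem.Set String)
    (h : s.Nodup) :
    (rows.foldl (fun s row => PySem.Set.update s (PySem.Dict.keys ⟨row⟩)) s).Nodup := by
  induction rows generalizing s with
  | nil => simpa
  | cons r t ih => exact ih _ (PySem.Set.nodup_update _ _ h)

theorem pv_headerSet_nodup (rows : List (List (String × String))) : (pvHeaderSet rows).Nodup :=
  pv_headerSet_nodup_aux rows _ List.Pairwise.nil

theorem pv_core (S : PySem.Set String) (hS : S.Nodup) :
    S.foldl (fun acc x => PySem.List.insertBy pvLt x acc) [] =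
      (pvPriority.filter (fun k => PySem.Set.contains S k)) ++
        PySem.List.sorted
          (PySem.Set.diff S (PySem.Set.ofList (pvPriority.filter (fun k => PySem.Set.contains S k))))
          (fun x => x) := by
  set ordered := pvPriority.filter (fun k => PySem.Set.contains S k) with hord
  set D := PySem.Set.diff S (PySem.Set.ofList ordered) with hD
  set sortedD := PySem.List.sorted D (fun x => x) with hsD
  have hmem_ord : ∀ x, x ∈ ordered ↔ x ∈ pvPriority ∧ x ∈ S := by
    intro x; rw [hord]; simp [List.mem_filter]
  have hnodup_ord : ordered.Nodup := pv_pri_nodup.filter _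
  have hDmem : ∀ x, x ∈ D ↔ x ∈ S ∧ x ∉ ordered := by
    intro x; rw [hD, PySem.Set.mem_diff, PySem.Set.mem_ofList]
  have hDnp : ∀ x ∈ D, x ∉ pvPriority := fun x hx hp =>
    ((hDmem x).mp hx).2 ((hmem_ord x).mpr ⟨hp, ((hDmem x).mp hx).1⟩)
  have hsD_mem : ∀ x, x ∈ sortedD ↔ x ∈ D := fun x => PySem.List.mem_sorted D _ _ x
  have hDnodup : D.Nodup := PySem.Set.nodup_diff _ _ hS
  have hsD_perm : sortedD.Perm D := PySem.List.sorted_perm D _ _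
  have hsDnodup : sortedD.Nodup := hsD_perm.nodup_iff.mpr hDnodup
  -- A's output is strictly increasing under B's comparison
  have hpw1 : ordered.Pairwise (fun a b => pvLt a b = true) :=
    (pv_pri_pairwise.filter _).imp (fun h => pvLt_of_key_lt _ _ h)
  have hpw2 : sortedD.Pairwise (fun a b => pvLt a b = true) := by
    have h1 : sortedD.Pairwise (fun a b : String => a ≤ b) :=
      PySem.List.sorted_pairwise D (fun x => x)
    refine (h1.and hsDnodup).imp_of_mem ?_
    intro a b ha hb hab
    have h15a : pvKey a = 15 := pvKey_not_mem a (hDnp a ((hsD_mem a).mp ha))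
    have h15b : pvKey b = 15 := pvKey_not_mem b (hDnp b ((hsD_mem b).mp hb))
    rw [pvLt_iff]
    exact Or.inr ⟨by rw [h15a, h15b]; exact lt_irrefl _, lt_of_le_of_ne hab.1 hab.2⟩
  have hcross : ∀ a ∈ ordered, ∀ b ∈ sortedD, pvLt a b = true := by
    intro a ha b hb
    have ha15 : pvKey a < 15 := pv_pri_key_lt a ((hmem_ord a).mp ha).1
    have hb15 : pvKey b = 15 := pvKey_not_mem b (hDnp b ((hsD_mem b).mp hb))
    exact pvLt_of_key_lt _ _ (by rw [hb15]; exact ha15)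
  have hpw : (ordered ++ sortedD).Pairwise (fun a b => pvLt a b = true) :=
    List.pairwise_append.mpr ⟨hpw1, hpw2, hcross⟩
  -- A's output is a permutation of the header set
  have hfilter_perm :
      (List.filter (fun x => PySem.Set.contains (PySem.Set.ofList ordered) x) S).Perm ordered := by
    rw [List.perm_ext_iff_of_nodup (hS.filter _) hnodup_ord]
    intro a
    simp only [List.mem_filter, PySem.Set.contains_iff, PySem.Set.mem_ofList]
    exact ⟨fun h => h.2, fun ho => ⟨((hmem_ord a).mp ho).2, ho⟩⟩
  have happ : (ordered ++ sortedD).Perm S := by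
    have h1 := List.filter_append_perm
      (fun x => PySem.Set.contains (PySem.Set.ofList ordered) x) S
    have hDfil : D = List.filter
        (fun x => !PySem.Set.contains (PySem.Set.ofList ordered) x) S := rfl
    have h2 : (ordered ++ D).Perm S := by
      rw [hDfil]
      exact (hfilter_perm.symm.append_right _).trans h1
    exact (List.Perm.append_left _ hsD_perm).trans h2
  exact pv_sorted_unique S (ordered ++ sortedD) happ hpw

theorem pv_main (rows : List (List (String × String))) :
    union_headers_py_alt rows = union_headers_py rows :=
  pv_core (pvHeaderSet rows) (pv_headerSet_nodup rows)

-- ===== VERDICT (by name: the statement is the Claim_ definition above) =====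
theorem union_headers_py_spec : Claim_equal_union_headers_py := by
  intro rows _
  unfold Spec_union_headers_py
  exact (pv_main rows).symm
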